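-- pv_equiv track=rewrite | github.com/bejar/FSociety | FSociety/Util/Util.py | nanoseconds_to_time
-- ===== SOURCE A (Python) =====
-- def nanoseconds_to_time(nnstime, prec=6):
--     """
--     Transforms nanoseconds to readable time
--     :param nano:
--     :return:
--     """
--     lfmt = ['{:02d}', ':{:02d}', ':{:02d}', '.{:03d}', '.{:03d}', '.{:03d}']
--     nnstime = int(nnstime)
--     nnseconds = nnstime % 1000
--     nnstime //= 1000
--     mcseconds = nnstime % 1000
--     nnstime //= 1000
--     mlseconds = nnstime % 1000
--     nnstime //= 1000
--     hours = nnstime // 3600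
--     rhours = nnstime % 3600
--     minutes = rhours // 60
--     seconds = rhours % 60
--     ltimes = [hours, minutes, seconds, mlseconds, mcseconds, nnseconds]
--     s = ''
--     for i in range(prec):
--         s += lfmt[i].format(ltimes[i])
--     return s
-- ===== SOURCE B (Python) =====
-- def nanoseconds_to_time(nnstime, prec=6):
--     """Each component is computed independently from the total nanosecond count via its own
--     unit divisor (and a wrap modulus), instead of sequentially peeling remainders."""
--     SPECS = [(3_600_000_000_000, 0, '{:02d}'),
--              (60_000_000_000, 60, ':{:02d}'),
--              (1_000_000_000, 60, ':{:02d}'),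
--              (1_000_000, 1000, '.{:03d}'),
--              (1_000, 1000, '.{:03d}'),
--              (1, 1000, '.{:03d}')]
--     n = int(nnstime)
--     out = []
--     for i in range(prec):
--         unit, wrap, fmt = SPECS[i]
--         v = n // unit
--         if wrap:
--             v %= wrap
--         out.append(fmt.format(v))
--     return ''.join(out)
-- ===== Notes on version B (the rewrite author's own statement) =====
-- stated objective: alternative
-- what changed: Instead of sequentially peeling remainders while carrying a shrinking quotient, B computes every component independently from the full nanosecond count by a table of (unit divisor, wrap modulus, template): v = n // unit [% wrap], so there is no dependence between components.
import Mathlib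
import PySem

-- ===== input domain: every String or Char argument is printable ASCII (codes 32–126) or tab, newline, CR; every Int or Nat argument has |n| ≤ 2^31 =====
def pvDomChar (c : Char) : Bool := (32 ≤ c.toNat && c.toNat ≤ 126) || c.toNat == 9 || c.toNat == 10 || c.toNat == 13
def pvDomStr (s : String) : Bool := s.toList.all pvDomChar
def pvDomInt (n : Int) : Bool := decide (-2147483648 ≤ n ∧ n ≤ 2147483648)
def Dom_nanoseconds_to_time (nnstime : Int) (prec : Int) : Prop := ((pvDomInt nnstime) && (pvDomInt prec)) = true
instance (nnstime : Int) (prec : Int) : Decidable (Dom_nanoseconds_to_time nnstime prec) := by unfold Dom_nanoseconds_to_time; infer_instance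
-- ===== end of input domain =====

-- B computes each of the six time components independently from the total nanosecond count
-- via a table of (unit divisor, wrap modulus, template) — no carried quotient (objective: alternative).

-- '{:0Nd}'.format(v) for an int v is exactly str(v).zfill(N); a template is (separator, pad width)
def pvFmt (f : List Char × Int) (v : Int) : List Char :=
  f.1 ++ PySem.Chars.zfill (PySem.Int.toChars v) f.2

-- ===== PORT A =====
-- the templates ['{:02d}', ':{:02d}', ':{:02d}', '.{:03d}', '.{:03d}', '.{:03d}'] as (sep, width)
def pvLfmt : List (List Char × Int) :=
  [([], 2), ([':'], 2), ([':'], 2), (['.'], 3), (['.'], 3), (['.'], 3)]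

def nanoseconds_to_time (nnstime : Int) (prec : Int) : String :=
  let n0 := nnstime
  let nnseconds := PySem.Int.mod n0 1000
  let n1 := PySem.Int.floordiv n0 1000
  let mcseconds := PySem.Int.mod n1 1000
  let n2 := PySem.Int.floordiv n1 1000
  let mlseconds := PySem.Int.mod n2 1000
  let n3 := PySem.Int.floordiv n2 1000
  let hours := PySem.Int.floordiv n3 3600
  let rhours := PySem.Int.mod n3 3600
  let minutes := PySem.Int.floordiv rhours 60
  let seconds := PySem.Int.mod rhours 60
  let ltimes := [hours, minutes, seconds, mlseconds, mcseconds, nnseconds]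
  -- lfmt[i] / ltimes[i] raise IndexError for i ≥ 6; Pre_ (prec ≤ 6) excludes exactly those inputs
  let s := (PySem.List.pyRange 0 prec 1).foldl
    (fun s i => s ++ pvFmt (PySem.List.pyGetD pvLfmt i ([], 0)) (PySem.List.pyGetD ltimes i 0))
    ([] : List Char)
  String.ofList s

-- ===== PORT B =====
-- the SPECS table: (unit divisor, wrap modulus — 0 means no wrap, template)
def pvSpecs : List (Int × Int × (List Char × Int)) :=
  [(3600000000000, 0, ([], 2)),
   (60000000000, 60, ([':'], 2)),
   (1000000000, 60, ([':'], 2)),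
   (1000000, 1000, (['.'], 3)),
   (1000, 1000, (['.'], 3)),
   (1, 1000, (['.'], 3))]

def nanoseconds_to_time_alt (nnstime : Int) (prec : Int) : String :=
  let n := nnstime
  -- SPECS[i] raises IndexError for i ≥ 6; Pre_ (prec ≤ 6) excludes exactly those inputs
  let out := (PySem.List.pyRange 0 prec 1).foldl
    (fun (out : List (List Char)) i =>
      let s := PySem.List.pyGetD pvSpecs i (0, 0, ([], 0))
      let v := PySem.Int.floordiv n s.1
      let v := if s.2.1 ≠ 0 then PySem.Int.mod v s.2.1 else v
      out ++ [pvFmt s.2.2 v])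
    ([] : List (List Char))
  String.ofList out.flatten

-- ===== PRECONDITION & SPEC =====
-- prec > 6 makes both Pythons raise IndexError (lfmt[i]/SPECS[i] at i = 6); excluded; nothing else is.
def Pre_nanoseconds_to_time (nnstime : Int) (prec : Int) : Prop := prec ≤ 6
instance (nnstime : Int) (prec : Int) : Decidable (Pre_nanoseconds_to_time nnstime prec) := by
  unfold Pre_nanoseconds_to_time; infer_instance

def pvWitness_nanoseconds_to_time : Int × Int := (1234567890, 6)

def Spec_nanoseconds_to_time (nnstime : Int) (prec : Int) (out : String) : Prop :=
  out = nanoseconds_to_time_alt nnstime prec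
instance (nnstime : Int) (prec : Int) (out : String) : Decidable (Spec_nanoseconds_to_time nnstime prec out) := by
  unfold Spec_nanoseconds_to_time; infer_instance

-- ===== CLAIM (what is proved, stated in full; the proofs are below) =====
def Claim_equal_nanoseconds_to_time : Prop := ∀ (nnstime : Int) (prec : Int), Dom_nanoseconds_to_time nnstime prec → Pre_nanoseconds_to_time nnstime prec → Spec_nanoseconds_to_time nnstime prec (nanoseconds_to_time nnstime prec)

-- ===== LEMMAS AND PROOFS =====

-- the six components coincide (floor-division arithmetic with literal divisors)
theorem pv_hours (n : Int) :
    PySem.Int.floordiv (PySem.Int.floordiv (PySem.Int.floordiv (PySem.Int.floordiv n 1000) 1000) 1000) 3600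
    = PySem.Int.floordiv n 3600000000000 := by
  simp only [PySem.Int.floordiv_eq_ediv_of_pos (by norm_num : (0:Int) < 1000),
    PySem.Int.floordiv_eq_ediv_of_pos (by norm_num : (0:Int) < 3600),
    PySem.Int.floordiv_eq_ediv_of_pos (by norm_num : (0:Int) < 3600000000000)]
  omega

theorem pv_minutes (n : Int) :
    PySem.Int.floordiv (PySem.Int.mod (PySem.Int.floordiv (PySem.Int.floordiv (PySem.Int.floordiv n 1000) 1000) 1000) 3600) 60
    = PySem.Int.mod (PySem.Int.floordiv n 60000000000) 60 := by
  simp only [PySem.Int.floordiv_eq_ediv_of_pos (by norm_num : (0:Int) < 1000),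
    PySem.Int.floordiv_eq_ediv_of_pos (by norm_num : (0:Int) < 60),
    PySem.Int.floordiv_eq_ediv_of_pos (by norm_num : (0:Int) < 60000000000),
    PySem.Int.mod_eq_emod_of_pos (by norm_num : (0:Int) < 3600),
    PySem.Int.mod_eq_emod_of_pos (by norm_num : (0:Int) < 60)]
  omega

theorem pv_seconds (n : Int) :
    PySem.Int.mod (PySem.Int.mod (PySem.Int.floordiv (PySem.Int.floordiv (PySem.Int.floordiv n 1000) 1000) 1000) 3600) 60
    = PySem.Int.mod (PySem.Int.floordiv n 1000000000) 60 := by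
  simp only [PySem.Int.floordiv_eq_ediv_of_pos (by norm_num : (0:Int) < 1000),
    PySem.Int.floordiv_eq_ediv_of_pos (by norm_num : (0:Int) < 1000000000),
    PySem.Int.mod_eq_emod_of_pos (by norm_num : (0:Int) < 3600),
    PySem.Int.mod_eq_emod_of_pos (by norm_num : (0:Int) < 60)]
  omega

theorem pv_mlseconds (n : Int) :
    PySem.Int.mod (PySem.Int.floordiv (PySem.Int.floordiv n 1000) 1000) 1000
    = PySem.Int.mod (PySem.Int.floordiv n 1000000) 1000 := by
  simp only [PySem.Int.floordiv_eq_ediv_of_pos (by norm_num : (0:Int) < 1000),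
    PySem.Int.floordiv_eq_ediv_of_pos (by norm_num : (0:Int) < 1000000),
    PySem.Int.mod_eq_emod_of_pos (by norm_num : (0:Int) < 1000)]
  omega

-- ===== VERDICT (by name: the statement is the Claim_ definition above) =====
theorem nanoseconds_to_time_spec : Claim_equal_nanoseconds_to_time := by
  intro n p _ hp
  unfold Spec_nanoseconds_to_time nanoseconds_to_time nanoseconds_to_time_alt
  simp only []
  rw [PySem.List.foldl_append_eq_flatMap, PySem.List.foldl_append_singleton_eq_map,
    List.flatMap_def]
  simp only [List.nil_append]
  apply congrArg (fun l => String.ofList (List.flatten l))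
  apply List.map_congr_left
  intro i hi
  have hmem := (PySem.List.mem_pyRange_one (a := 0) (b := p) (x := i)).1 hi
  have h0 : (0:Int) ≤ i := hmem.1
  have h6 : i < 6 := lt_of_lt_of_le hmem.2 hp
  unfold Pre_nanoseconds_to_time at hp
  interval_cases i
  · simpa [pvLfmt, pvSpecs, PySem.List.pyGetD_ofNat', pvFmt] using congrArg (fun v => pvFmt ([], 2) v) (pv_hours n)
  · simpa [pvLfmt, pvSpecs, PySem.List.pyGetD_ofNat', pvFmt] using congrArg (fun v => pvFmt ([':'], 2) v) (pv_minutes n)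
  · simpa [pvLfmt, pvSpecs, PySem.List.pyGetD_ofNat', pvFmt] using congrArg (fun v => pvFmt ([':'], 2) v) (pv_seconds n)
  · simpa [pvLfmt, pvSpecs, PySem.List.pyGetD_ofNat', pvFmt] using congrArg (fun v => pvFmt (['.'], 3) v) (pv_mlseconds n)
  · simp [pvLfmt, pvSpecs, PySem.List.pyGetD_ofNat', pvFmt]
  · simp [pvLfmt, pvSpecs, PySem.List.pyGetD_ofNat', pvFmt]
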